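-- pv_equiv track=rewrite | github.com/Punkwe1ght/superpowers | game-theory-extractor/validate.py | parse_prolog_string
-- ===== SOURCE A (Python) =====
-- from typing import Tuple
--
-- def parse_prolog_string(s: str) -> Tuple[str, int]:
--     """Parse a Prolog string, returning the string content and end position."""
--     if not s.startswith('"'):
--         raise ValueError("String must start with quote")
--
--     result = []
--     i = 1
--     while i < len(s):
--         if s[i] == '"':
--             # Check for doubled quote (escaped)
--             if i + 1 < len(s) and s[i + 1] == '"':
--                 result.append('"')
--                 i += 2
--             else:
--                 # End of string
--                 return ''.join(result), i + 1
--         elif s[i] == '\\' and i + 1 < len(s):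
--             # Backslash escape (also valid in some Prolog)
--             result.append(s[i + 1])
--             i += 2
--         else:
--             result.append(s[i])
--             i += 1
--
--     raise ValueError("Unterminated string")
-- ===== SOURCE B (Python) =====
-- from typing import Tuple
--
-- def parse_prolog_string(s: str) -> Tuple[str, int]:
--     """Parse a Prolog string, returning the string content and end position."""
--     if not s.startswith('"'):
--         raise ValueError("String must start with quote")
--
--     chunks = []
--     i = 1
--     n = len(s)
--     while True:
--         # locate the nearest special character (quote or backslash) at or after i
--         q = s.find('"', i)
--         b = s.find('\\', i)
--         if q == -1 and b == -1:
--             raise ValueError("Unterminated string")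
--         pos = q if b == -1 else (b if q == -1 else min(q, b))
--         chunks.append(s[i:pos])
--         if s[pos] == '"':
--             if s.startswith('"', pos + 1):
--                 chunks.append('"')
--                 i = pos + 2
--             else:
--                 return ''.join(chunks), pos + 1
--         else:  # backslash
--             if pos + 1 < n:
--                 chunks.append(s[pos + 1])
--                 i = pos + 2
--             else:
--                 # lone backslash at end of input: no closing quote can follow
--                 raise ValueError("Unterminated string")
-- ===== Notes on version B (the rewrite author's own statement) =====
-- stated objective: alternative
-- what changed: A scans and appends one character at a time; B locates the next quote/backslash with str.find, copies the whole run of ordinary characters as one slice chunk, and joins the chunks at the end.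
import Mathlib
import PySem

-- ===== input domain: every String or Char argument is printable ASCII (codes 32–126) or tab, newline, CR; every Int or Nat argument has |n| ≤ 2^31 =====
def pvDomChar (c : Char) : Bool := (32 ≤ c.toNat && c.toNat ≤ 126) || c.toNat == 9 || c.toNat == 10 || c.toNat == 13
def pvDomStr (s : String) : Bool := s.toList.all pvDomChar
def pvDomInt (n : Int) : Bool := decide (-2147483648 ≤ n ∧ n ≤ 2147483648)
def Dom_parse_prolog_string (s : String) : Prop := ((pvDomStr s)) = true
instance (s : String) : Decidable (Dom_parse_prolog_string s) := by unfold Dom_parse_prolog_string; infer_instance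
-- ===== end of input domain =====

-- B replaces A's char-by-char scan with a chunked scan: it takes the maximal run of
-- ordinary characters up to the next quote/backslash in one slice and joins the chunks
-- at the end (objective: alternative decomposition; same asymptotic cost).


-- ===== PORT A =====
-- A's while loop, one character at a time: head of `cs` is s[i], `acc` is A's `result`
-- list of chars, `none` is the ValueError "Unterminated string".
def pvGoA (cs : List Char) (i : Int) (acc : List Char) : Option (String × Int) :=
  match cs with
  | [] => none
  | '"' :: rest =>
      match rest with
      | '"' :: rest2 => pvGoA rest2 (i + 2) (acc ++ ['"'])
      | _ => some (String.ofList acc, i + 1)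
  | '\\' :: c :: rest => pvGoA rest (i + 2) (acc ++ [c])
  | c :: rest => pvGoA rest (i + 1) (acc ++ [c])

def parse_prolog_string (s : String) : String × Int :=
  match s.toList with
  | '"' :: rest => (pvGoA rest 1 []).getD ("", 0)  -- ValueError "Unterminated string" ↦ default, outside Pre_
  | _ => ("", 0)                                   -- ValueError "String must start with quote" ↦ default, outside Pre_

-- ===== PORT B =====
def pvSpecChar (c : Char) : Bool := c == '"' || c == '\\'

-- B's loop: the takeWhile/dropWhile split at the nearest quote-or-backslash is the list
-- rendition of Source B's find over both characters; the takeWhile run is the slice s[i:pos]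
-- appended as ONE chunk, then the special character at pos is dispatched on.
def pvGoB (cs : List Char) (i : Int) (chunks : List String) : Option (String × Int) :=
  match h : cs.dropWhile (fun c => !pvSpecChar c) with
  | [] => none
  | '"' :: '"' :: rest2 =>
      pvGoB rest2 (i + (cs.takeWhile (fun c => !pvSpecChar c)).length + 2)
        (chunks ++ [String.ofList (cs.takeWhile (fun c => !pvSpecChar c)), "\""])
  | '"' :: _ =>
      some (String.join (chunks ++ [String.ofList (cs.takeWhile (fun c => !pvSpecChar c))]),
        i + (cs.takeWhile (fun c => !pvSpecChar c)).length + 1)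
  | _ :: c :: rest =>
      pvGoB rest (i + (cs.takeWhile (fun c => !pvSpecChar c)).length + 2)
        (chunks ++ [String.ofList (cs.takeWhile (fun c => !pvSpecChar c)), String.ofList [c]])
  | _ :: [] => none
  termination_by cs.length
  decreasing_by
  · have := List.length_dropWhile_le (fun c => !pvSpecChar c) cs
    simp [h] at this; omega
  · have := List.length_dropWhile_le (fun c => !pvSpecChar c) cs
    simp [h] at this; omega


def parse_prolog_string_alt (s : String) : String × Int :=
  match s.toList with
  | '"' :: rest => (pvGoB rest 1 []).getD ("", 0)
  | _ => ("", 0)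

-- ===== PRECONDITION & SPEC =====
-- Pre_ excludes exactly the inputs on which A raises ValueError: strings that do not
-- start with '"' and strings whose body is never closed by an unescaped, undoubled quote.
def pvTerm : List Char → Bool
  | [] => false
  | '"' :: '"' :: r => pvTerm r
  | '"' :: _ => true
  | '\\' :: _ :: r => pvTerm r
  | _ :: r => pvTerm r

def pvPre : List Char → Bool
  | '"' :: rest => pvTerm rest
  | _ => false

def Pre_parse_prolog_string (s : String) : Prop := pvPre s.toList = true
instance (s : String) : Decidable (Pre_parse_prolog_string s) := by
  unfold Pre_parse_prolog_string; infer_instance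

def pvWitness_parse_prolog_string : String := "\"ab\\\"c\""

def Spec_parse_prolog_string (s : String) (out : String × Int) : Prop := out = parse_prolog_string_alt s
instance (s : String) (out : String × Int) : Decidable (Spec_parse_prolog_string s out) := by unfold Spec_parse_prolog_string; infer_instance

-- ===== CLAIM (what is proved, stated in full; the proofs are below) =====
def Claim_equal_parse_prolog_string : Prop := ∀ (s : String), Dom_parse_prolog_string s → Pre_parse_prolog_string s → Spec_parse_prolog_string s (parse_prolog_string s)

-- ===== LEMMAS AND PROOFS =====

theorem pvGoA_acc2 (cs : List Char) (i : Int) (b : List Char) :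
    ∀ a, pvGoA cs i (a ++ b) = (pvGoA cs i b).map (fun r => (String.ofList a ++ r.1, r.2)) := by
  fun_induction pvGoA cs i b <;> intro a <;>
    simp_all [pvGoA, String.ofList_append, List.append_assoc]

theorem pvGoA_acc (cs : List Char) (i : Int) (acc : List Char) :
    pvGoA cs i acc = (pvGoA cs i []).map (fun r => (String.ofList acc ++ r.1, r.2)) := by
  simpa using pvGoA_acc2 cs i [] acc

theorem pvGoA_plain (p : List Char) (hp : ∀ c ∈ p, pvSpecChar c = false) (d : List Char)
    (i : Int) (acc : List Char) :
    pvGoA (p ++ d) i acc = pvGoA d (i + p.length) (acc ++ p) := by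
  induction p generalizing i acc with
  | nil => simp
  | cons c p' ih =>
      have hc : pvSpecChar c = false := hp c (List.mem_cons_self ..)
      have hq : c ≠ '"' := by simp [pvSpecChar] at hc; exact hc.1
      have hb : c ≠ '\\' := by simp [pvSpecChar] at hc; exact hc.2
      have hstep : pvGoA (c :: (p' ++ d)) i acc = pvGoA (p' ++ d) (i + 1) (acc ++ [c]) := by
        rw [pvGoA.eq_def]
        split <;> simp_all
      rw [List.cons_append, hstep, ih (fun x hx => hp x (List.mem_cons_of_mem _ hx))]
      simp [List.append_assoc]
      ring_nf


theorem pvHead_spec (cs : List Char) (hd : Char) (t : List Char)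
    (h : cs.dropWhile (fun c => !pvSpecChar c) = hd :: t) : pvSpecChar hd = true := by
  have := List.head_dropWhile_not (fun c => !pvSpecChar c) (l := cs) (by simp [h])
  simpa [h] using this

theorem pvGoA_split (cs : List Char) (i : Int) :
    pvGoA cs i [] = (pvGoA (cs.dropWhile (fun c => !pvSpecChar c))
        (i + (cs.takeWhile (fun c => !pvSpecChar c)).length) []).map
      (fun r => (String.ofList (cs.takeWhile (fun c => !pvSpecChar c)) ++ r.1, r.2)) := by
  conv_lhs => rw [← List.takeWhile_append_dropWhile (p := fun c => !pvSpecChar c) (l := cs)]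
  rw [pvGoA_plain _ (by intro c hc; simpa using List.mem_takeWhile_imp hc)]
  · rw [pvGoA_acc]; simp
  
theorem pvJoin_snoc (l : List String) (x : String) : String.join (l ++ [x]) = String.join l ++ x := by
  simp [String.join, List.foldl_append]




theorem pvJoin_snoc2 (l : List String) (x y : String) :
    String.join (l ++ [x, y]) = String.join l ++ x ++ y := by
  simp [String.join, List.foldl_append]

theorem pvGoB_eq (cs : List Char) (i : Int) (chunks : List String) :
    pvGoB cs i chunks = (pvGoA cs i []).map (fun r => (String.join chunks ++ r.1, r.2)) := by
  fun_induction pvGoB cs i chunks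
  case case1 =>
    rename_i cs i chunks h
    rw [pvGoA_split, h]
    simp [pvGoA]
  case case2 =>
    rename_i cs i chunks rest2 h ih
    rw [pvGoA_split, h, ih]
    simp only [pvGoA, List.nil_append]
    conv_rhs => rw [pvGoA_acc]
    cases pvGoA rest2 (i + ((cs.takeWhile (fun c => !pvSpecChar c)).length : Int) + 2) [] <;>
      simp [pvJoin_snoc2, String.append_assoc,
        (show String.ofList ['\"'] = "\"" from rfl)]
  case case3 =>
    rename_i cs i chunks tail hne h
    rw [pvGoA_split, h]
    simp only [pvGoA]
    simp [pvJoin_snoc]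
  case case4 =>
    rename_i cs i chunks hd c rest hne1 hne2 h ih
    have hhd : hd = '\\' := by
      have := pvHead_spec cs hd _ h
      simp [pvSpecChar] at this
      rcases this with h1 | h1
      · exact absurd h1 hne2
      · exact h1
    subst hhd
    rw [pvGoA_split, h, ih]
    simp only [pvGoA, List.nil_append]
    conv_rhs => rw [pvGoA_acc]
    cases pvGoA rest (i + ((cs.takeWhile (fun c => !pvSpecChar c)).length : Int) + 2) [] <;>
      simp [pvJoin_snoc2, String.append_assoc]
  case case5 =>
    rename_i cs i chunks hd hne h
    have hhd : hd = '\\' := by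
      have := pvHead_spec cs hd _ h
      simp [pvSpecChar] at this
      rcases this with h1 | h1
      · exact absurd h1 hne
      · exact h1
    subst hhd
    rw [pvGoA_split, h]
    simp [pvGoA]

-- The two ports agree on every input (Pre_ only marks where the Python does not raise).
theorem pvPorts_eq (s : String) : parse_prolog_string s = parse_prolog_string_alt s := by
  rw [parse_prolog_string.eq_def, parse_prolog_string_alt.eq_def]
  split
  · rename_i rest _
    rw [pvGoB_eq]
    cases pvGoA rest 1 [] <;> simp [String.join]
  · rfl

-- ===== VERDICT (by name: the statement is the Claim_ definition above) =====
theorem parse_prolog_string_spec : Claim_equal_parse_prolog_string := by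
  intro s _ _
  unfold Spec_parse_prolog_string
  exact pvPorts_eq s
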